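-- pv_equiv track=rewrite | github.com/quoterbox/somevar-ui-playground | src/somevar_ui_playground/ui/playground_support.py | _parse_quote_line
-- ===== SOURCE A (Python) =====
-- def _parse_quote_line(text: str) -> tuple[int, str] | None:
--     stripped = text.lstrip()
--     if not stripped.startswith('>'):
--         return None
--
--     level = 0
--     index = 0
--     while index < len(stripped) and stripped[index] == '>':
--         level += 1
--         index += 1
--         while index < len(stripped) and stripped[index] == ' ':
--             index += 1
--
--     content = stripped[index:].strip()
--     return level, content
-- ===== SOURCE B (Python) =====
-- def _parse_quote_line(text: str) -> tuple[int, str] | None: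
--     stripped = text.lstrip()
--     if not stripped.startswith('>'):
--         return None
--     rest = stripped.lstrip('> ')
--     marker = stripped[:len(stripped) - len(rest)]
--     return marker.count('>'), rest.strip()
-- ===== Notes on version B (the rewrite author's own statement) =====
-- stated objective: simpler
-- what changed: A's nested while-loop state machine over indices is replaced by a single character-set lstrip that removes the whole quote-marker prefix at once, with the level recovered by counting the marker character in the removed prefix.
import Mathlib
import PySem

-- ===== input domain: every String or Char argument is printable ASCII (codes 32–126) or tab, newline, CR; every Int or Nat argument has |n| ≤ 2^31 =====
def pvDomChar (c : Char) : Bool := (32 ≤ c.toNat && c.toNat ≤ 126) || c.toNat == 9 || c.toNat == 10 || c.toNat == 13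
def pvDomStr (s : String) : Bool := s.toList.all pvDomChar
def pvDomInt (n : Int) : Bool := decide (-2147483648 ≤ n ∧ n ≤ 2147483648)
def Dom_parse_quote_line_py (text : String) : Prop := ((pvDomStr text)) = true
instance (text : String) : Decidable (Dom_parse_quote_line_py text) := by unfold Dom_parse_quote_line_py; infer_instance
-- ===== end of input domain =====

-- B replaces A's nested while-loop state machine by one character-set lstrip of the
-- whole quote-marker prefix followed by a count of the marker character in it (simpler; same cost).

-- ===== PORT A =====
-- inner while: 'while index < len(stripped) and stripped[index] == " ": index += 1'
-- (index-based scan ported as structural recursion on the remaining suffix)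
def pvSkipSpacesA : List Char → List Char
  | [] => []
  | c :: rest => if c = ' ' then pvSkipSpacesA rest else c :: rest

theorem pvSkipSpacesA_length_le (l : List Char) : (pvSkipSpacesA l).length ≤ l.length := by
  induction l with
  | nil => simp [pvSkipSpacesA]
  | cons c rest ih =>
    simp only [pvSkipSpacesA]
    split
    · exact Nat.le_succ_of_le ih
    · simp

-- outer while: 'while index < len(stripped) and stripped[index] == ">": level += 1; index += 1; <inner>'
def pvLoopA : List Char → Int → Int × List Char
  | [], level => (level, [])
  | c :: rest, level =>
    if c = '>' then pvLoopA (pvSkipSpacesA rest) (level + 1) else (level, c :: rest)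
termination_by l _ => l.length
decreasing_by
  exact Nat.lt_succ_of_le (pvSkipSpacesA_length_le rest)

def parse_quote_line_py (text : String) : Option (Int × String) :=
  let stripped := PySem.Chars.lstrip text.toList
  if PySem.Chars.startswith stripped ['>'] then
    let r := pvLoopA stripped 0
    some (r.1, String.ofList (PySem.Chars.strip r.2))
  else
    none

-- ===== PORT B =====
def parse_quote_line_py_alt (text : String) : Option (Int × String) :=
  let stripped := PySem.Chars.lstrip text.toList
  if PySem.Chars.startswith stripped ['>'] then
    -- Source B's one-sided strip over a char set has no PySem primitive;
    -- ported by hand as dropWhile of membership in ['>',' '] (exact)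
    let rest := stripped.dropWhile (fun c => (['>', ' '] : List Char).contains c)
    let marker := PySem.Chars.slice stripped none
      (some ((stripped.length - rest.length : Nat) : Int))
    some ((PySem.Chars.count marker ['>'] : Int), String.ofList (PySem.Chars.strip rest))
  else
    none

-- ===== PRECONDITION & SPEC =====
def Spec_parse_quote_line_py (text : String) (out : Option (Int × String)) : Prop := out = parse_quote_line_py_alt text
instance (text : String) (out : Option (Int × String)) : Decidable (Spec_parse_quote_line_py text out) := by unfold Spec_parse_quote_line_py; infer_instance

-- ===== CLAIM (what is proved, stated in full; the proofs are below) =====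
def Claim_equal_parse_quote_line_py : Prop := ∀ (text : String), Dom_parse_quote_line_py text → Spec_parse_quote_line_py text (parse_quote_line_py text)

-- ===== LEMMAS AND PROOFS =====

-- single-character substring count is element count
theorem pvCountGo_single (c : Char) :
    ∀ (l : List Char) (fuel acc : Nat), l.length ≤ fuel →
      PySem.Chars.count.go [c] fuel l acc = acc + l.count c := by
  intro l
  induction l with
  | nil => intro fuel acc _; cases fuel <;> simp [PySem.Chars.count.go]
  | cons d t ih =>
    intro fuel acc h
    cases fuel with
    | zero => simp at h
    | succ f =>
      simp only [PySem.Chars.count.go]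
      by_cases hd : d = c
      · subst hd
        simp only [List.isPrefixOf, beq_self_eq_true, Bool.true_and, if_pos]
        rw [show ([d].length : Nat) = 1 from rfl]
        simp only [List.drop_one, List.tail_cons]
        rw [ih f (acc + 1) (by simpa using Nat.le_of_succ_le_succ h)]
        simp
        omega
      · have : ([c].isPrefixOf (d :: t)) = false := by
          simp [List.isPrefixOf]
          exact fun h' => hd h'.symm
        rw [this]
        simp only [Bool.false_eq_true, if_false]
        rw [ih f acc (by simpa using Nat.le_of_succ_le_succ h)]
        simp [hd]

theorem pvCount_single (c : Char) (l : List Char) :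
    PySem.Chars.count l [c] = l.count c := by
  simp only [PySem.Chars.count, List.isEmpty, Bool.false_eq_true, if_false]
  simpa using pvCountGo_single c l l.length 0 (le_refl _)

-- the loop of A computes the count of '>' in the '>'/' ' prefix and its suffix
theorem pvLoopA_key (l : List Char) :
    ∀ lev : Int,
      pvLoopA (pvSkipSpacesA l) lev =
        (lev + ((l.takeWhile (fun c => (['>', ' '] : List Char).contains c)).count '>' : Int),
         l.dropWhile (fun c => (['>', ' '] : List Char).contains c)) := by
  induction l with
  | nil => intro lev; simp [pvSkipSpacesA, pvLoopA]
  | cons c rest ih =>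
    intro lev
    by_cases hsp : c = ' '
    · subst hsp
      have hsk : pvSkipSpacesA (' ' :: rest) = pvSkipSpacesA rest := by
        simp [pvSkipSpacesA]
      rw [hsk, ih lev]
      simp
    · have hsk : pvSkipSpacesA (c :: rest) = c :: rest := by
        simp [pvSkipSpacesA, hsp]
      rw [hsk]
      by_cases hgt : c = '>'
      · subst hgt
        rw [pvLoopA, if_pos rfl, ih (lev + 1)]
        simp only [List.takeWhile_cons, List.dropWhile_cons, Prod.mk.injEq]
        norm_num [List.count_cons]
        ring
      · rw [pvLoopA, if_neg hgt]
        simp [hgt, hsp]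

theorem pvTake_eq_takeWhile (p : Char → Bool) (l : List Char) :
    l.take (l.length - (l.dropWhile p).length) = l.takeWhile p := by
  have h : l.takeWhile p ++ l.dropWhile p = l := List.takeWhile_append_dropWhile
  calc l.take (l.length - (l.dropWhile p).length)
      = (l.takeWhile p ++ l.dropWhile p).take ((l.takeWhile p).length) := by
        rw [h]
        congr 1
        have h2 := congrArg List.length h
        simp only [List.length_append] at h2
        omega
    _ = l.takeWhile p := List.take_left

-- ===== VERDICT (by name: the statement is the Claim_ definition above) =====
theorem parse_quote_line_py_spec : Claim_equal_parse_quote_line_py := by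
  intro text _
  unfold Spec_parse_quote_line_py parse_quote_line_py parse_quote_line_py_alt
  set stripped := PySem.Chars.lstrip text.toList with hs
  by_cases hstart : PySem.Chars.startswith stripped ['>'] = true
  · simp only [hstart, if_pos]
    -- stripped starts with '>', so A's loop starts exactly at pvSkipSpacesA stripped
    obtain ⟨t, ht⟩ : ∃ t, stripped = '>' :: t := by
      rcases (PySem.Chars.startswith_iff _ _).mp hstart with ⟨t, ht⟩
      exact ⟨t, ht.symm⟩
    have hskip : pvSkipSpacesA stripped = stripped := by
      rw [ht]; simp [pvSkipSpacesA]
    have hloop := pvLoopA_key stripped 0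
    rw [hskip] at hloop
    rw [hloop]
    have hslice : PySem.Chars.slice stripped none
        (some ((stripped.length -
          (stripped.dropWhile (fun c => (['>', ' '] : List Char).contains c)).length : Nat) : Int)) =
        stripped.takeWhile (fun c => (['>', ' '] : List Char).contains c) := by
      rw [PySem.Chars.slice_eq_listSlice, PySem.List.slice_to_natCast]
      exact pvTake_eq_takeWhile _ _
    simp only [hslice, pvCount_single]
    simp
  · simp [hstart]
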